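-- pv_equiv track=rewrite | github.com/FanchenBao/leetcode | Contest_148/1144.py | movesToMakeZigzag
-- ===== SOURCE A (Python) =====
-- from typing import List
--
-- def movesToMakeZigzag(nums: List[int]) -> int:
--     # A[0] > A[1] < A[2] > A[3] < A[4] > ...
--     steps1 = 0
--     nums1 = nums[:]
--     for i in range(len(nums1) - 1):
--         if i % 2 == 0 and nums1[i] <= nums1[i + 1]:
--             steps1 += nums1[i + 1] - nums1[i] + 1
--             nums1[i + 1] = nums1[i] - 1
--         elif i % 2 != 0 and nums1[i] >= nums1[i + 1]:
--             steps1 += nums1[i] - nums1[i + 1] + 1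
--             nums1[i] = nums1[i + 1] - 1
--     # A[0] < A[1] > A[2] < A[3] > A[4] < ...
--     steps2 = 0
--     nums2 = nums[:]
--     for i in range(len(nums2) - 1):
--         if i % 2 == 0 and nums2[i] >= nums2[i + 1]:
--             steps2 += nums2[i] - nums2[i + 1] + 1
--             nums2[i] = nums2[i + 1] - 1
--         elif i % 2 != 0 and nums2[i] <= nums2[i + 1]:
--             steps2 += nums2[i + 1] - nums2[i] + 1
--             nums2[i + 1] = nums2[i] - 1
--     return min(steps1, steps2)
-- ===== SOURCE B (Python) =====
-- def movesToMakeZigzag(nums):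
--     # Single non-mutating pass per parity: sum, for each "valley" position,
--     # how far it must drop below its smaller original neighbor.
--     n = len(nums)
--
--     def valleys(left, i):
--         # cost to push nums[i], nums[i+2], ... below their neighbors,
--         # where `left` is the value left of position i
--         total = 0
--         while i < n:
--             lo = min(left, nums[i + 1]) if i + 1 < n else left
--             total += max(0, nums[i] - lo + 1)
--             if i + 1 < n:
--                 left = nums[i + 1]
--             i += 2
--         return total
--
--     if n <= 1:
--         return 0
--     odd = valleys(nums[0], 1)
--     even = max(0, nums[0] - nums[1] + 1) + valleys(nums[1], 2)
--     return min(even, odd)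
-- ===== Notes on version B (the rewrite author's own statement) =====
-- stated objective: simpler
-- what changed: A's two copy-and-mutate greedy passes over the array are replaced by a direct non-mutating summation, per parity, of each valley element's cost max(0, v - min(neighbours) + 1) against the original values.
import Mathlib
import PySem

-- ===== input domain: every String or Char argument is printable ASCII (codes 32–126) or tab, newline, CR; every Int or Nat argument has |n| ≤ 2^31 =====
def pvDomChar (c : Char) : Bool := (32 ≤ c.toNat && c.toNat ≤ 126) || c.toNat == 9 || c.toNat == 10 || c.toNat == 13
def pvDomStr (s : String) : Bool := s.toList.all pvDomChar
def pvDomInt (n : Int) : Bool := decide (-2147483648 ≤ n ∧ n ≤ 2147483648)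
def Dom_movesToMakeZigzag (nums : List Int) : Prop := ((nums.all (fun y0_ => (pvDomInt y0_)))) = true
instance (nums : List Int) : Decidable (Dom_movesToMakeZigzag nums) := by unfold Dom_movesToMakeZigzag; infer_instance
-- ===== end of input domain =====

-- B replaces A's two copy-and-mutate greedy passes by one non-mutating per-parity
-- valley-cost summation (objective: simpler; same asymptotic cost).

-- ===== PORT A =====
-- loop body of A's first pass (pattern A[0] > A[1] < A[2] > …); state = (steps1, nums1).
-- Loop indices i satisfy 0 ≤ i < len-1, so Nat indices with List.getD/List.set are exact.
def stepA1 : Int × List Int → Nat → Int × List Int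
  | (steps, l), i =>
    if i % 2 = 0 ∧ l.getD i 0 ≤ l.getD (i + 1) 0 then
      (steps + (l.getD (i + 1) 0 - l.getD i 0 + 1), l.set (i + 1) (l.getD i 0 - 1))
    else if i % 2 ≠ 0 ∧ l.getD (i + 1) 0 ≤ l.getD i 0 then
      (steps + (l.getD i 0 - l.getD (i + 1) 0 + 1), l.set i (l.getD (i + 1) 0 - 1))
    else
      (steps, l)

-- loop body of A's second pass (pattern A[0] < A[1] > A[2] < …); state = (steps2, nums2)
def stepA2 : Int × List Int → Nat → Int × List Int
  | (steps, l), i =>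
    if i % 2 = 0 ∧ l.getD (i + 1) 0 ≤ l.getD i 0 then
      (steps + (l.getD i 0 - l.getD (i + 1) 0 + 1), l.set i (l.getD (i + 1) 0 - 1))
    else if i % 2 ≠ 0 ∧ l.getD i 0 ≤ l.getD (i + 1) 0 then
      (steps + (l.getD (i + 1) 0 - l.getD i 0 + 1), l.set (i + 1) (l.getD i 0 - 1))
    else
      (steps, l)

def movesToMakeZigzag (nums : List Int) : Int :=
  let steps1 := ((List.range (nums.length - 1)).foldl stepA1 (0, nums)).1
  let steps2 := ((List.range (nums.length - 1)).foldl stepA2 (0, nums)).1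
  min steps1 steps2

-- ===== PORT B =====
-- B's `valleys(left, i)` while-loop: cost to push nums[i], nums[i+2], … below their neighbours
def valleysB (nums : List Int) (n : Nat) (left : Int) (total : Int) (i : Nat) : Int :=
  if _h : i < n then
    let lo := if i + 1 < n then min left (nums.getD (i + 1) 0) else left
    let total' := total + max 0 (nums.getD i 0 - lo + 1)
    let left' := if i + 1 < n then nums.getD (i + 1) 0 else left
    valleysB nums n left' total' (i + 2)
  else total
termination_by n - i

def movesToMakeZigzag_alt (nums : List Int) : Int :=
  let n := nums.length
  if n ≤ 1 then 0
  else
    let odd := valleysB nums n (nums.getD 0 0) 0 1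
    let even := max 0 (nums.getD 0 0 - nums.getD 1 0 + 1) + valleysB nums n (nums.getD 1 0) 0 2
    min even odd

-- ===== PRECONDITION & SPEC =====
def Spec_movesToMakeZigzag (nums : List Int) (out : Int) : Prop := out = movesToMakeZigzag_alt nums
instance (nums : List Int) (out : Int) : Decidable (Spec_movesToMakeZigzag nums out) := by unfold Spec_movesToMakeZigzag; infer_instance

-- ===== CLAIM (what is proved, stated in full; the proofs are below) =====
def Claim_equal_movesToMakeZigzag : Prop := ∀ (nums : List Int), Dom_movesToMakeZigzag nums → Spec_movesToMakeZigzag nums (movesToMakeZigzag nums)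

-- ===== LEMMAS AND PROOFS =====

-- per-valley cost sum: V x l = cost of making l[0], l[2], … strictly below their
-- neighbours, where x is the value to the left of l[0]
def V (x : Int) : List Int → Int
  | [] => 0
  | [y] => max 0 (y - x + 1)
  | y :: z :: t => max 0 (y - min x z + 1) + V z t

-- abstract form of one of A's greedy passes: the only mutated cell ever read again is
-- the current one (value x); b = "the current index plays pass-1's even role"
def go1 (b : Bool) (x : Int) : List Int → Int
  | [] => 0
  | y :: t =>
    if b then
      (if x ≤ y then (y - x + 1) + go1 false (x - 1) t else go1 false y t)
    else
      (if y ≤ x then (x - y + 1) + go1 true y t else go1 true y t)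

theorem go1_eq_V (x : Int) (l : List Int) : go1 true x l = V x l := by
  induction x, l using V.induct with
  | case1 x => simp [go1, V]
  | case2 x y => simp only [go1, V]; split_ifs <;> omega
  | case3 x y z t ih =>
    simp only [go1, V]
    split_ifs <;> try contradiction
    all_goals (rw [ih]; omega)

theorem getD_drop_eq (l nums : List Int) (k : Nat)
    (h : l.drop k = nums.drop k) : l.getD k 0 = nums.getD k 0 := by
  have h0 : l[k]? = nums[k]? := by
    have := congrArg (fun t => t[0]?) h
    simpa [List.getElem?_drop] using this
  simp [List.getD_eq_getElem?_getD, h0]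

theorem drop_set_of_lt (l : List Int) (i j : Nat) (v : Int) (h : i < j) :
    (l.set i v).drop j = l.drop j := by
  apply List.ext_getElem?
  intro k
  simp [List.getElem?_drop, List.getElem?_set]
  omega

-- invariant of A's first pass, from index k on: the list agrees with nums strictly
-- above k, and only steps + go1 of the current value matters
theorem pass1_loop (nums : List Int) :
    ∀ (c k : Nat) (s : Int) (l : List Int),
      c = nums.length - 1 - k → l.length = nums.length →
      l.drop (k + 1) = nums.drop (k + 1) →
      ((List.range' k c).foldl stepA1 (s, l)).1
        = s + go1 (k % 2 = 0) (l.getD k 0) (nums.drop (k + 1)) := by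
  intro c
  induction c with
  | zero =>
    intro k s l hc hlen hdrop
    have hk : nums.length ≤ k + 1 := by omega
    simp [List.drop_eq_nil_of_le hk, go1]
  | succ c ih =>
    intro k s l hc hlen hdrop
    have hk1 : k + 1 < nums.length := by omega
    have hk1l : k + 1 < l.length := by omega
    have hy : l.getD (k + 1) 0 = nums.getD (k + 1) 0 := getD_drop_eq _ _ _ hdrop
    have hdropc : nums.drop (k + 1) = nums.getD (k + 1) 0 :: nums.drop (k + 2) := by
      rw [List.getD_eq_getElem _ _ hk1, List.drop_eq_getElem_cons hk1]
    have hdrop2 : l.drop (k + 2) = nums.drop (k + 2) := by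
      have := congrArg (List.drop 1) hdrop
      simpa using this
    rw [List.range'_succ, List.foldl_cons]
    set x := l.getD k 0 with hx
    set y := nums.getD (k + 1) 0 with hyv
    by_cases hpar : k % 2 = 0
    · by_cases hle : x ≤ y
      · have hstep : stepA1 (s, l) k
            = (s + (y - x + 1), l.set (k + 1) (x - 1)) := by
          rw [stepA1, if_pos ⟨hpar, by rw [hy]; exact hle⟩, hy]
        rw [hstep, ih (k + 1) _ _ (by omega) (by simp [hlen])
            (by rw [drop_set_of_lt _ _ _ _ (by omega)]; exact hdrop2)]
        have hget : (l.set (k + 1) (x - 1)).getD (k + 1) 0 = x - 1 := by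
          rw [List.getD_eq_getElem _ _ (by simpa using hk1l)]
          simp [List.getElem_set_self]
        rw [hget, hdropc]
        have hpar1 : ¬((k + 1) % 2 = 0) := by omega
        simp [go1, hpar, hle, hpar1]
        try ring
      · have hstep : stepA1 (s, l) k = (s, l) := by
          rw [stepA1, if_neg (fun h => hle (by rw [← hy]; exact h.2)),
            if_neg (fun h => h.1 hpar)]
        rw [hstep, ih (k + 1) _ _ (by omega) hlen hdrop2, hy, hdropc]
        have hpar1 : ¬((k + 1) % 2 = 0) := by omega
        simp [go1, hpar, hle, hpar1]
    · by_cases hge : y ≤ x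
      · have hstep : stepA1 (s, l) k
            = (s + (x - y + 1), l.set k (y - 1)) := by
          rw [stepA1, if_neg (fun h => hpar h.1),
            if_pos ⟨hpar, by rw [hy]; exact hge⟩, hy]
        rw [hstep, ih (k + 1) _ _ (by omega) (by simp [hlen])
            (by rw [drop_set_of_lt _ _ _ _ (by omega)]; exact hdrop2)]
        have hget : (l.set k (y - 1)).getD (k + 1) 0 = y := by
          rw [← hy]
          apply getD_drop_eq
          rw [drop_set_of_lt _ _ _ _ (by omega)]
        rw [hget, hdropc]
        have hpar1 : (k + 1) % 2 = 0 := by omega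
        simp [go1, hpar, hge, hpar1]
        try ring
      · have hstep : stepA1 (s, l) k = (s, l) := by
          rw [stepA1, if_neg (fun h => hpar h.1),
            if_neg (fun h => hge (by rw [← hy]; exact h.2))]
        rw [hstep, ih (k + 1) _ _ (by omega) hlen hdrop2, hy, hdropc]
        have hpar1 : (k + 1) % 2 = 0 := by omega
        simp [go1, hpar, hge, hpar1]

-- same invariant for the second pass; the roles of the parities are swapped
theorem pass2_loop (nums : List Int) :
    ∀ (c k : Nat) (s : Int) (l : List Int),
      c = nums.length - 1 - k → l.length = nums.length →
      l.drop (k + 1) = nums.drop (k + 1) →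
      ((List.range' k c).foldl stepA2 (s, l)).1
        = s + go1 (¬(k % 2 = 0)) (l.getD k 0) (nums.drop (k + 1)) := by
  intro c
  induction c with
  | zero =>
    intro k s l hc hlen hdrop
    have hk : nums.length ≤ k + 1 := by omega
    simp [List.drop_eq_nil_of_le hk, go1]
  | succ c ih =>
    intro k s l hc hlen hdrop
    have hk1 : k + 1 < nums.length := by omega
    have hk1l : k + 1 < l.length := by omega
    have hy : l.getD (k + 1) 0 = nums.getD (k + 1) 0 := getD_drop_eq _ _ _ hdrop
    have hdropc : nums.drop (k + 1) = nums.getD (k + 1) 0 :: nums.drop (k + 2) := by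
      rw [List.getD_eq_getElem _ _ hk1, List.drop_eq_getElem_cons hk1]
    have hdrop2 : l.drop (k + 2) = nums.drop (k + 2) := by
      have := congrArg (List.drop 1) hdrop
      simpa using this
    rw [List.range'_succ, List.foldl_cons]
    set x := l.getD k 0 with hx
    set y := nums.getD (k + 1) 0 with hyv
    by_cases hpar : k % 2 = 0
    · by_cases hge : y ≤ x
      · have hstep : stepA2 (s, l) k
            = (s + (x - y + 1), l.set k (y - 1)) := by
          rw [stepA2, if_pos ⟨hpar, by rw [hy]; exact hge⟩, hy]
        rw [hstep, ih (k + 1) _ _ (by omega) (by simp [hlen])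
            (by rw [drop_set_of_lt _ _ _ _ (by omega)]; exact hdrop2)]
        have hget : (l.set k (y - 1)).getD (k + 1) 0 = y := by
          rw [← hy]
          apply getD_drop_eq
          rw [drop_set_of_lt _ _ _ _ (by omega)]
        rw [hget, hdropc]
        have hpar1 : ¬((k + 1) % 2 = 0) := by omega
        simp [go1, hpar, hge, hpar1]
        try ring
      · have hstep : stepA2 (s, l) k = (s, l) := by
          rw [stepA2, if_neg (fun h => hge (by rw [← hy]; exact h.2)),
            if_neg (fun h => h.1 hpar)]
        rw [hstep, ih (k + 1) _ _ (by omega) hlen hdrop2, hy, hdropc]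
        have hpar1 : ¬((k + 1) % 2 = 0) := by omega
        simp [go1, hpar, hge, hpar1]
    · by_cases hle : x ≤ y
      · have hstep : stepA2 (s, l) k
            = (s + (y - x + 1), l.set (k + 1) (x - 1)) := by
          rw [stepA2, if_neg (fun h => hpar h.1),
            if_pos ⟨hpar, by rw [hy]; exact hle⟩, hy]
        rw [hstep, ih (k + 1) _ _ (by omega) (by simp [hlen])
            (by rw [drop_set_of_lt _ _ _ _ (by omega)]; exact hdrop2)]
        have hget : (l.set (k + 1) (x - 1)).getD (k + 1) 0 = x - 1 := by
          rw [List.getD_eq_getElem _ _ (by simpa using hk1l)]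
          simp [List.getElem_set_self]
        rw [hget, hdropc]
        have hpar1 : (k + 1) % 2 = 0 := by omega
        simp [go1, hpar, hle, hpar1]
        try ring
      · have hstep : stepA2 (s, l) k = (s, l) := by
          rw [stepA2, if_neg (fun h => hpar h.1),
            if_neg (fun h => hle (by rw [← hy]; exact h.2))]
        rw [hstep, ih (k + 1) _ _ (by omega) hlen hdrop2, hy, hdropc]
        have hpar1 : (k + 1) % 2 = 0 := by omega
        simp [go1, hpar, hle, hpar1]

-- B's while-loop computes V of the corresponding suffix
theorem valleysB_eq_V (nums : List Int) :
    ∀ (c i : Nat) (left total : Int), nums.length - i ≤ c →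
      valleysB nums nums.length left total i = total + V left (nums.drop i) := by
  intro c
  induction c with
  | zero =>
    intro i left total hc
    have hi : nums.length ≤ i := by omega
    rw [valleysB]
    simp [List.drop_eq_nil_of_le hi, V, Nat.not_lt.mpr hi]
  | succ c ih =>
    intro i left total hc
    by_cases hi : i < nums.length
    case neg =>
      have hi' : nums.length ≤ i := by omega
      rw [valleysB]
      simp [List.drop_eq_nil_of_le hi', V, hi]
    have hdropc : nums.drop i = nums.getD i 0 :: nums.drop (i + 1) := by
      rw [List.getD_eq_getElem _ _ hi, List.drop_eq_getElem_cons hi]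
    rw [valleysB]
    by_cases h1 : i + 1 < nums.length
    · have hdropc1 : nums.drop (i + 1) = nums.getD (i + 1) 0 :: nums.drop (i + 2) := by
        rw [List.getD_eq_getElem _ _ h1, List.drop_eq_getElem_cons h1]
      rw [dif_pos hi]
      simp only [h1, if_pos]
      rw [ih (i + 2) _ _ (by omega), hdropc, hdropc1]
      simp [V]
      ring
    · rw [dif_pos hi]
      simp only [h1, if_false]
      rw [ih (i + 2) _ _ (by omega), hdropc,
        List.drop_eq_nil_of_le (by omega), List.drop_eq_nil_of_le (by omega)]
      simp [V]

theorem go1_false_cons (x y : Int) (t : List Int) :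
    go1 false x (y :: t) = max 0 (x - y + 1) + go1 true y t := by
  by_cases h : y ≤ x <;> simp [go1, h] <;> omega

-- ===== VERDICT (by name: the statement is the Claim_ definition above) =====
theorem movesToMakeZigzag_spec : Claim_equal_movesToMakeZigzag := by
  intro nums _
  unfold Spec_movesToMakeZigzag movesToMakeZigzag movesToMakeZigzag_alt
  by_cases hn : nums.length ≤ 1
  · have h0 : nums.length - 1 = 0 := by omega
    simp [h0, hn]
  · have h2 : 2 ≤ nums.length := by omega
    have hr : List.range (nums.length - 1) = List.range' 0 (nums.length - 1) :=
      List.range_eq_range'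
    have hdrop1 : nums.drop 1 = nums.getD 1 0 :: nums.drop 2 := by
      rw [List.getD_eq_getElem _ _ (by omega), List.drop_eq_getElem_cons (by omega)]
    have hp1 := pass1_loop nums (nums.length - 1) 0 0 nums (by omega) rfl rfl
    have hp2 := pass2_loop nums (nums.length - 1) 0 0 nums (by omega) rfl rfl
    rw [hr, hp1, hp2]
    have e1 : (decide (0 % 2 = 0)) = true := by decide
    have e2 : (decide ¬(0 % 2 = 0)) = false := by decide
    rw [e1, e2]
    simp only [if_neg hn]
    rw [valleysB_eq_V nums (nums.length - 1) 1 _ _ (by omega),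
        valleysB_eq_V nums (nums.length - 2) 2 _ _ (by omega)]
    rw [hdrop1, go1_false_cons]
    simp only [go1_eq_V, zero_add]
    exact min_comm _ _
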